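-- pv_equiv track=rewrite | github.com/deepdataspace/dds-cloudapi-sdk | dds_cloudapi_sdk/tasks/ivp.py | string2rle
-- ===== SOURCE A (Python) =====
-- from typing import List
--
-- def string2rle(rle_str: str) -> List[int]:
--     p = 0
--     cnts = []
--
--     while p < len(rle_str) and rle_str[p]:
--         x = 0
--         k = 0
--         more = 1
--
--         while more:
--             c = ord(rle_str[p]) - 48
--             x |= (c & 0x1f) << 5 * k
--             more = c & 0x20
--             p += 1
--             k += 1
--
--             if not more and (c & 0x10):
--                 x |= -1 << 5 * k
--
--         if len(cnts) > 2:
--             x += cnts[len(cnts) - 2]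
--         cnts.append(x)
--     return cnts
-- ===== SOURCE B (Python) =====
-- from typing import List
--
-- def string2rle(rle_str: str) -> List[int]:
--     # Pass 1: split the string into base-48 digit groups; each char contributes a
--     # base-32 digit d % 32, and a group ends at a char whose continuation bit is
--     # clear, i.e. (ord(c) - 48) % 64 < 32.  (A trailing incomplete group is ignored;
--     # A raises IndexError there, which is outside Pre_.)
--     groups = []
--     cur = []
--     for ch in rle_str:
--         d = ord(ch) - 48
--         cur.append(d % 32)
--         if d % 64 < 32:
--             groups.append(cur)
--             cur = []
--     # Pass 2: each group -> signed integer by base-32 Horner evaluation from the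
--     # most significant digit, with the top digit sign-corrected (d >= 16 means
--     # negative: use d - 32).
--     raw = []
--     for g in groups:
--         if g[-1] >= 16:
--             g[-1] -= 32
--         v = 0
--         for d in reversed(g):
--             v = v * 32 + d
--         raw.append(v)
--     # Pass 3: the out[i] = raw[i] + out[i-2] recurrence (i >= 3) as two parity
--     # running sums; out[0] stands alone.
--     out = []
--     se = so = 0
--     for i, v in enumerate(raw):
--         if i == 0:
--             out.append(v)
--         elif i % 2:
--             so += v
--             out.append(so)
--         else:
--             se += v
--             out.append(se)
--     return out
-- ===== Notes on version B (the rewrite author's own statement) =====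
-- stated objective: alternative
-- what changed: A's single fused loop of bitwise varint decoding (shift/OR accumulation, OR-based sign extension) plus an out[i-2] readback is replaced by three staged passes using arithmetic: split the string into base-32 digit groups by d % 64 < 32, evaluate each group by signed base-32 Horner (top digit d - 32 when d >= 16), then apply the delta recurrence as two parity running sums with no readback into the output list.
import Mathlib
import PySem

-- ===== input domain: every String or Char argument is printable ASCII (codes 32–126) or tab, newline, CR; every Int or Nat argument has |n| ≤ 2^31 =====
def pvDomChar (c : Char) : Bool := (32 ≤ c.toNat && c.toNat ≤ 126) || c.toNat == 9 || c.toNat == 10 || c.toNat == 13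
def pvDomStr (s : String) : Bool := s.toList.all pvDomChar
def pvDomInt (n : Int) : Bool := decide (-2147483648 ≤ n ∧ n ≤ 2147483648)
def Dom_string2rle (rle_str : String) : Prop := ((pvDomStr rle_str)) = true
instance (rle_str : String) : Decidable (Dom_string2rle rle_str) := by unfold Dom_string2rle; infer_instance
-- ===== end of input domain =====

-- B replaces A's fused bitwise varint loop (shift/OR accumulation, OR sign extension,
-- out[i-2] readback) by three arithmetic passes: split into base-32 digit groups,
-- signed base-32 Horner evaluation per group, then two parity running sums.
-- Same O(n) cost; the objective is the alternative algorithm/decomposition.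

-- ===== PORT A =====

-- A's inner `while more` loop: consumes chars of `cs`, state (x, k); returns the decoded
-- value and the remaining chars, or none where Python raises IndexError (string ends mid-varint).
def decVarA : List Char → Int → Nat → Option (Int × List Char)
  | [], _, _ => none
  | c :: rest, x, k =>
    let cv : Int := (c.toNat : Int) - 48
    let x1 := PySem.Int.bor x ((PySem.Int.band cv 0x1f) <<< (5 * k))
    let more := PySem.Int.band cv 0x20
    -- `if not more and (c & 0x10): x |= -1 << 5 * k`  (after p += 1; k += 1)
    let x2 := if more = 0 ∧ PySem.Int.band cv 0x10 ≠ 0 then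
                PySem.Int.bor x1 ((-1 : Int) <<< (5 * (k + 1))) else x1
    if more ≠ 0 then decVarA rest x2 (k + 1) else some (x2, rest)

theorem decVarA_length_lt : ∀ (cs : List Char) (x : Int) (k : Nat) (v : Int) (rest : List Char),
    decVarA cs x k = some (v, rest) → rest.length < cs.length := by
  intro cs
  induction cs with
  | nil => intro _ _ _ _ h; simp [decVarA] at h
  | cons c cs ih =>
    intro x k v rest h
    simp only [decVarA] at h
    split at h
    · exact Nat.lt_succ_of_lt (ih _ _ _ _ h)
    · simp at h; simp [h.2]

-- A's outer `while p < len(rle_str)` loop; `cnts` is kept reversed (most recent first),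
-- so Python's append is cons and `cnts[len(cnts) - 2]` is element 1.  The loop exit
-- `p = len` is the `decVarA [] _ _ = none` case.
def string2rleAuxA (cs : List Char) (acc : List Int) : List Int :=
  match h : decVarA cs 0 0 with
  | none => acc.reverse   -- end of string (or, for cs ≠ [], IndexError: excluded by Pre_)
  | some (x, rest) =>
    string2rleAuxA rest ((if acc.length > 2 then x + acc.getD 1 0 else x) :: acc)
termination_by cs.length
decreasing_by exact decVarA_length_lt _ _ _ _ _ h

def string2rle (rle_str : String) : List Int :=
  string2rleAuxA rle_str.toList []

-- ===== PORT B =====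

-- B's pass 1: `for ch in rle_str: cur.append(d % 32); if d % 64 < 32: close group`;
-- a trailing incomplete group is ignored (A raises IndexError there, outside Pre_).
def splitGroupsB : List Char → List Int → List (List Int)
  | [], _ => []
  | c :: rest, cur =>
    let d : Int := (c.toNat : Int) - 48
    let cur' := cur ++ [PySem.Int.mod d 32]
    if PySem.Int.mod d 64 < 32 then cur' :: splitGroupsB rest [] else splitGroupsB rest cur'

-- `if g[-1] >= 16: g[-1] -= 32` (groups are never empty, so g[-1] cannot raise; pyGetD is exact there)
def signFixB (g : List Int) : List Int :=
  if 16 ≤ PySem.List.pyGetD g (-1) 0 then g.dropLast ++ [PySem.List.pyGetD g (-1) 0 - 32] else g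

-- `v = 0; for d in reversed(g): v = v * 32 + d`
def hornerB (g : List Int) : Int := g.reverse.foldl (fun v d => v * 32 + d) 0

-- B's pass 2: `for g in groups: … raw.append(v)`
def rawOfB (groups : List (List Int)) : List Int := groups.map (fun g => hornerB (signFixB g))

-- B's pass 3: `for i, v in enumerate(raw)` with the two running sums se/so.
def paritySumsB : List Int → Nat → Int → Int → List Int
  | [], _, _, _ => []
  | v :: rest, i, se, so =>
    if i = 0 then v :: paritySumsB rest (i + 1) se so
    else if i % 2 = 1 then (so + v) :: paritySumsB rest (i + 1) se (so + v)
    else (se + v) :: paritySumsB rest (i + 1) (se + v) so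

def string2rle_alt (rle_str : String) : List Int :=
  paritySumsB (rawOfB (splitGroupsB rle_str.toList [])) 0 0 0

-- ===== PRECONDITION & SPEC =====
-- Pre_ excludes exactly the inputs on which A raises IndexError (the string ends in the
-- middle of a varint, i.e. its last character still has the continuation bit 0x20 set).
def Pre_string2rle (rle_str : String) : Prop :=
  (match rle_str.toList.getLast? with
   | none => true
   | some c => PySem.Int.band ((c.toNat : Int) - 48) 0x20 == 0) = true
instance (rle_str : String) : Decidable (Pre_string2rle rle_str) := by
  unfold Pre_string2rle; infer_instance

def pvWitness_string2rle : String := "61"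

def Spec_string2rle (rle_str : String) (out : List Int) : Prop := out = string2rle_alt rle_str
instance (rle_str : String) (out : List Int) : Decidable (Spec_string2rle rle_str out) := by
  unfold Spec_string2rle; infer_instance

-- ===== CLAIM (what is proved, stated in full; the proofs are below) =====
def Claim_equal_string2rle : Prop := ∀ (rle_str : String), Dom_string2rle rle_str → Pre_string2rle rle_str → Spec_string2rle rle_str (string2rle rle_str)

-- ===== LEMMAS AND PROOFS =====

-- all characters of the remaining input are in the stated domain
def AllDom (cs : List Char) : Prop := ∀ c ∈ cs, pvDomChar c = true

-- unsigned little-endian base-32 value of a digit list (proof-side spec)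
def unsV (l : List Int) : Int := l.foldr (fun d a => d + 32 * a) 0

def DigitsOK (l : List Int) : Prop := ∀ e ∈ l, 0 ≤ e ∧ e < 32

theorem unsV_append_singleton (l : List Int) (m : Int) :
    unsV (l ++ [m]) = unsV l + m * 32 ^ l.length := by
  induction l with
  | nil => simp [unsV]
  | cons a t ih => simp only [List.cons_append, unsV, List.foldr, List.length_cons] at *; rw [ih]; ring

theorem unsV_bounds (l : List Int) (h : DigitsOK l) : 0 ≤ unsV l ∧ unsV l < 32 ^ l.length := by
  induction l with
  | nil => simp [unsV]
  | cons a t ih =>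
    obtain ⟨ha0, ha32⟩ := h a (List.mem_cons_self)
    obtain ⟨ih0, ih1⟩ := ih (fun e he => h e (List.mem_cons_of_mem _ he))
    constructor
    · simp only [unsV, List.foldr] at *; positivity
    · simp only [unsV, List.foldr, List.length_cons] at *
      have : (32:Int) ^ (t.length + 1) = 32 * 32 ^ t.length := by ring
      rw [this]; nlinarith

-- Horner from the most significant digit computes the same value
theorem hornerB_eq_unsV (g : List Int) : hornerB g = unsV g := by
  suffices h : ∀ (l : List Int) (a : Int),
      l.reverse.foldl (fun v d => v * 32 + d) a = a * 32 ^ l.length + unsV l by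
    have := h g 0; simpa [hornerB] using this
  intro l
  induction l with
  | nil => intro a; simp [unsV]
  | cons x t ih =>
    intro a
    simp only [List.reverse_cons, List.foldl_append, List.foldl_cons, List.foldl_nil, ih,
      List.length_cons, unsV, List.foldr]
    have : unsV t = t.foldr (fun d a => d + 32 * a) 0 := rfl
    rw [← this]; ring

-- disjoint OR is addition (Nat level)
theorem lorDisjNat (n x m : Nat) (h : x < 2 ^ n) : (x ||| m <<< n) = x + m * 2 ^ n := by
  apply Nat.eq_of_testBit_eq
  intro i
  rw [Nat.testBit_lor, Nat.testBit_shiftLeft]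
  have h2 : (0:Nat) < 2 ^ i := Nat.two_pow_pos i
  rcases Nat.lt_or_ge i n with hi | hi
  · have h1 : (x + m * 2 ^ n).testBit i = x.testBit i := by
      rw [Nat.testBit_eq_decide_div_mod_eq, Nat.testBit_eq_decide_div_mod_eq]
      have hsplit : m * 2 ^ n = (m * 2 ^ (n - i)) * 2 ^ i := by
        rw [Nat.mul_assoc, ← Nat.pow_add]; congr 2; omega
      rw [hsplit, Nat.add_mul_div_right _ _ h2]
      have hd : (2:Nat) ∣ m * 2 ^ (n - i) := Dvd.dvd.mul_left (dvd_pow_self 2 (by omega)) m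
      have heven : (x / 2 ^ i + m * 2 ^ (n - i)) % 2 = x / 2 ^ i % 2 := by omega
      rw [heven]
    rw [h1]
    simp [Nat.not_le.mpr hi]
  · have hx : x.testBit i = false :=
      Nat.testBit_lt_two_pow (Nat.lt_of_lt_of_le h (Nat.pow_le_pow_right (by norm_num) hi))
    have h1 : (x + m * 2 ^ n).testBit i = m.testBit (i - n) := by
      rw [Nat.testBit_eq_decide_div_mod_eq, Nat.testBit_eq_decide_div_mod_eq]
      have hsplit : (2:Nat) ^ i = 2 ^ n * 2 ^ (i - n) := by rw [← Nat.pow_add]; congr 1; omega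
      rw [hsplit, ← Nat.div_div_eq_div_mul, Nat.add_mul_div_right _ _ (Nat.two_pow_pos n),
        Nat.div_eq_of_lt h, Nat.zero_add]
    rw [h1, hx]
    simp [hi]

-- Int-level disjoint OR: x < 32^k occupies the low 5k bits, m is shifted above them
theorem borDisjInt (x m : Int) (k : Nat) (hx0 : 0 ≤ x) (hx : x < 32 ^ k) (hm0 : 0 ≤ m) :
    PySem.Int.bor x (m <<< (5 * k)) = x + m * 32 ^ k := by
  have hpow : (32:Int) ^ k = 2 ^ (5 * k) := by rw [pow_mul]; norm_num
  obtain ⟨mn, rfl⟩ := Int.eq_ofNat_of_zero_le hm0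
  obtain ⟨xn, rfl⟩ := Int.eq_ofNat_of_zero_le hx0
  have hxn : xn < 2 ^ (5 * k) := by
    have hh := hx; rw [hpow] at hh; exact_mod_cast hh
  have hsh : (mn : Int) <<< (5 * k) = ((mn <<< (5 * k) : Nat) : Int) := by
    rw [Int.shiftLeft_eq, Nat.shiftLeft_eq]; push_cast; ring
  rw [hsh, PySem.Int.bor_of_nonneg (by positivity) (by positivity)]
  rw [Int.toNat_natCast, Int.toNat_natCast, lorDisjNat _ _ _ hxn, hpow]
  push_cast
  ring

-- OR with -1 <<< n is subtraction of 2^n on [0, 2^n)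
theorem borSignInt (x : Int) (n : Nat) (hx0 : 0 ≤ x) (hx : x < 2 ^ n) :
    PySem.Int.bor x ((-1 : Int) <<< n) = x - 2 ^ n := by
  have hp : (0:Int) < 2 ^ n := by positivity
  have hsh : (-1 : Int) <<< n = -(2 ^ n) := by rw [Int.shiftLeft_eq]; ring
  rw [hsh]
  unfold PySem.Int.bor
  rw [if_pos hx0, if_neg (by omega)]
  have hc : ((2 ^ n : Nat) : Int) = 2 ^ n := by push_cast; rfl
  have h2 : (-(-(2 ^ n : Int)) - 1).toNat = 2 ^ n - 1 := by
    rw [neg_neg]; omega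
  rw [h2]
  have hxn : x.toNat < 2 ^ n := by omega
  rw [Nat.land_comm, Nat.and_two_pow_sub_one_eq_mod, Nat.mod_eq_of_lt hxn]
  have hle : x.toNat ≤ 2 ^ n - 1 := by omega
  omega

-- bitwise facts about a single character value, on the domain's range
theorem charBits (d : Int) (h1 : -39 ≤ d) (h2 : d ≤ 78) :
    PySem.Int.band d 31 = PySem.Int.mod d 32 ∧
    (PySem.Int.band d 32 = 0 ↔ PySem.Int.mod d 64 < 32) ∧
    (PySem.Int.band d 16 ≠ 0 ↔ 16 ≤ PySem.Int.mod d 32) := by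
  interval_cases d <;> exact (by decide)

theorem domCharBound (c : Char) (h : pvDomChar c = true) :
    -39 ≤ (c.toNat : Int) - 48 ∧ (c.toNat : Int) - 48 ≤ 78 := by
  simp [pvDomChar] at h
  omega

theorem digitsOK_append {cur : List Int} {m : Int} (h : DigitsOK cur) (h0 : 0 ≤ m)
    (h32 : m < 32) : DigitsOK (cur ++ [m]) := by
  intro e he
  rcases List.mem_append.mp he with h' | h'
  · exact h e h'
  · simp at h'; subst h'; exact ⟨h0, h32⟩

-- one varint of A corresponds to one group of B
theorem decA_split : ∀ (cs : List Char), AllDom cs → ∀ (cur : List Int), DigitsOK cur →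
    (decVarA cs (unsV cur) cur.length = none → splitGroupsB cs cur = []) ∧
    (∀ v rest, decVarA cs (unsV cur) cur.length = some (v, rest) →
      AllDom rest ∧ ∃ g, splitGroupsB cs cur = g :: splitGroupsB rest [] ∧ v = hornerB (signFixB g)) := by
  intro cs
  induction cs with
  | nil =>
    intro _ cur _
    refine ⟨fun _ => rfl, fun v rest h => by simp [decVarA] at h⟩
  | cons c cs ih =>
    intro hdom cur hcur
    have hc := domCharBound c (hdom c List.mem_cons_self)
    obtain ⟨hb1, hb2, hb3⟩ := charBits ((c.toNat : Int) - 48) hc.1 hc.2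
    have hdomT : AllDom cs := fun c' h' => hdom c' (List.mem_cons_of_mem _ h')
    have hm0 : 0 ≤ PySem.Int.mod ((c.toNat : Int) - 48) 32 := PySem.Int.mod_nonneg _ (by norm_num)
    have hm32 : PySem.Int.mod ((c.toNat : Int) - 48) 32 < 32 := PySem.Int.mod_lt _ (by norm_num)
    obtain ⟨hu0, hu1⟩ := unsV_bounds cur hcur
    have hcur' : DigitsOK (cur ++ [PySem.Int.mod ((c.toNat : Int) - 48) 32]) :=
      digitsOK_append hcur hm0 hm32
    have hx1 : PySem.Int.bor (unsV cur)
        ((PySem.Int.band ((c.toNat : Int) - 48) 31) <<< (5 * cur.length))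
        = unsV (cur ++ [PySem.Int.mod ((c.toNat : Int) - 48) 32]) := by
      rw [hb1, borDisjInt _ _ _ hu0 hu1 hm0, unsV_append_singleton]
    have hlen : (cur ++ [PySem.Int.mod ((c.toNat : Int) - 48) 32]).length = cur.length + 1 := by
      simp
    by_cases hmore : PySem.Int.band ((c.toNat : Int) - 48) 32 = 0
    · -- terminator: A returns the (possibly sign-extended) value, B closes the group
      have hlt : PySem.Int.mod ((c.toNat : Int) - 48) 64 < 32 := hb2.mp hmore
      obtain ⟨hu0', hu1'⟩ := unsV_bounds _ hcur'
      have hsome : decVarA (c :: cs) (unsV cur) cur.length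
          = some ((if PySem.Int.band ((c.toNat : Int) - 48) 16 ≠ 0
                   then PySem.Int.bor (unsV (cur ++ [PySem.Int.mod ((c.toNat : Int) - 48) 32]))
                          ((-1 : Int) <<< (5 * (cur.length + 1)))
                   else unsV (cur ++ [PySem.Int.mod ((c.toNat : Int) - 48) 32])), cs) := by
        simp only [decVarA, hx1]
        rw [if_neg (by simp [hmore])]
        congr 1
        by_cases h16 : PySem.Int.band ((c.toNat : Int) - 48) 16 ≠ 0
        · rw [if_pos ⟨hmore, h16⟩, if_pos h16]
        · rw [if_neg (fun hh => h16 hh.2), if_neg h16]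
      constructor
      · intro h; rw [hsome] at h; exact absurd h (by simp)
      · intro v rest h
        rw [hsome] at h
        obtain ⟨hv, hrest⟩ := Prod.mk.injEq .. ▸ Option.some.inj h
        subst hrest
        refine ⟨hdomT, cur ++ [PySem.Int.mod ((c.toNat : Int) - 48) 32],
          by simp only [splitGroupsB, if_pos hlt], ?_⟩
        rw [← hv, hornerB_eq_unsV]
        unfold signFixB
        rw [PySem.List.pyGetD_neg_one_append_singleton]
        have hpow32 : (32:Int) ^ (cur.length + 1) = 2 ^ (5 * (cur.length + 1)) := by
          rw [pow_mul]; norm_num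
        by_cases h16 : PySem.Int.band ((c.toNat : Int) - 48) 16 ≠ 0
        · rw [if_pos h16, if_pos (hb3.mp h16), List.dropLast_concat, unsV_append_singleton,
            unsV_append_singleton]
          rw [borSignInt _ (5 * (cur.length + 1)) (by rw [← unsV_append_singleton]; exact hu0')
                (by rw [← unsV_append_singleton, ← hpow32, ← hlen]; exact hu1'),
              ← hpow32]
          ring
        · rw [if_neg h16, if_neg (fun hh => h16 (hb3.mpr hh))]
    · -- continuation: both loops extend the current group and recurse
      have hnlt : ¬ PySem.Int.mod ((c.toNat : Int) - 48) 64 < 32 := fun hlt => hmore (hb2.mpr hlt)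
      have e1 : decVarA (c :: cs) (unsV cur) cur.length
          = decVarA cs (unsV (cur ++ [PySem.Int.mod ((c.toNat : Int) - 48) 32]))
              (cur ++ [PySem.Int.mod ((c.toNat : Int) - 48) 32]).length := by
        simp only [decVarA, hx1]
        rw [if_pos hmore]
        rw [if_neg (show ¬ (PySem.Int.band ((c.toNat : Int) - 48) 32 = 0 ∧
              PySem.Int.band ((c.toNat : Int) - 48) 16 ≠ 0) from fun hh => hmore hh.1), hlen]
      have e2 : splitGroupsB (c :: cs) cur
          = splitGroupsB cs (cur ++ [PySem.Int.mod ((c.toNat : Int) - 48) 32]) := by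
        simp only [splitGroupsB, if_neg hnlt]
      rw [e1, e2]
      exact ih hdomT _ hcur'

-- the sequence of varint values A decodes (proof-side view of A's outer loop)
def rawA (cs : List Char) : List Int :=
  match h : decVarA cs 0 0 with
  | none => []
  | some (x, rest) => x :: rawA rest
termination_by cs.length
decreasing_by exact decVarA_length_lt _ _ _ _ _ h

theorem rawA_none {cs : List Char} (h : decVarA cs 0 0 = none) : rawA cs = [] := by
  rw [rawA]; split <;> simp_all

theorem rawA_some {cs rest : List Char} {x : Int} (h : decVarA cs 0 0 = some (x, rest)) :
    rawA cs = x :: rawA rest := by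
  rw [rawA]; split <;> simp_all

-- A's decoded values are exactly B's passes 1+2
theorem rawA_eq : ∀ (n : Nat) (cs : List Char), cs.length ≤ n → AllDom cs →
    rawA cs = rawOfB (splitGroupsB cs []) := by
  intro n
  induction n with
  | zero =>
    intro cs h _
    have hcs : cs = [] := List.length_eq_zero_iff.mp (Nat.le_zero.mp h)
    subst hcs
    rw [rawA_none rfl]
    rfl
  | succ n ih =>
    intro cs h hdom
    have hs := decA_split cs hdom [] (by intro e he; simp at he)
    match hd : decVarA cs 0 0 with
    | none =>
      rw [rawA_none hd, hs.1 hd]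
      rfl
    | some (x, rest) =>
      obtain ⟨hdomR, g, hsplit, hv⟩ := hs.2 x rest hd
      have hlen : rest.length ≤ n :=
        Nat.lt_succ_iff.mp (Nat.lt_of_lt_of_le (decVarA_length_lt _ _ _ _ _ hd) h)
      rw [rawA_some hd, hsplit]
      simp only [rawOfB, List.map_cons]
      rw [hv, ih rest hlen hdomR]
      rfl

-- staged form of A's delta accumulation (proof-side spec)
def prefixRec : List Int → Nat → List Int → List Int
  | [], _, out => out.reverse
  | v :: rest, i, out => prefixRec rest (i + 1) ((if 3 ≤ i then v + out.getD 1 0 else v) :: out)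

theorem auxA_none {cs : List Char} {acc : List Int} (h : decVarA cs 0 0 = none) :
    string2rleAuxA cs acc = acc.reverse := by
  rw [string2rleAuxA]; split <;> simp_all

theorem auxA_some {cs rest : List Char} {acc : List Int} {x : Int}
    (h : decVarA cs 0 0 = some (x, rest)) :
    string2rleAuxA cs acc
      = string2rleAuxA rest ((if acc.length > 2 then x + acc.getD 1 0 else x) :: acc) := by
  rw [string2rleAuxA]; split <;> simp_all

-- A's fused loop equals the staged recurrence over its decoded values
theorem auxA_eq_prefixRec : ∀ (n : Nat) (cs : List Char), cs.length ≤ n →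
    ∀ (acc : List Int), string2rleAuxA cs acc = prefixRec (rawA cs) acc.length acc := by
  intro n
  induction n with
  | zero =>
    intro cs h acc
    have hcs : cs = [] := List.length_eq_zero_iff.mp (Nat.le_zero.mp h)
    subst hcs
    rw [auxA_none rfl, rawA_none rfl, prefixRec]
  | succ n ih =>
    intro cs h acc
    match hd : decVarA cs 0 0 with
    | none => rw [auxA_none hd, rawA_none hd, prefixRec]
    | some (x, rest) =>
      have hlen : rest.length ≤ n :=
        Nat.lt_succ_iff.mp (Nat.lt_of_lt_of_le (decVarA_length_lt _ _ _ _ _ hd) h)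
      rw [auxA_some hd, rawA_some hd, prefixRec, ih rest hlen]
      have hcond : (if acc.length > 2 then x + acc.getD 1 0 else x)
          = (if 3 ≤ acc.length then x + acc.getD 1 0 else x) := by
        split <;> split <;> first | rfl | omega
      rw [hcond]
      simp

-- the two parity running sums carry exactly the out[i-1] / out[i-2] values the
-- staged recurrence reads back
theorem parity_prefix : ∀ (raw acc : List Int) (se so : Int),
    (acc.length % 2 = 0 →
      so = (if 2 ≤ acc.length then acc.getD 0 0 else 0) ∧
      se = (if 3 ≤ acc.length then acc.getD 1 0 else 0)) →
    (acc.length % 2 = 1 →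
      se = (if 3 ≤ acc.length then acc.getD 0 0 else 0) ∧
      so = (if 3 ≤ acc.length then acc.getD 1 0 else 0)) →
    prefixRec raw acc.length acc = acc.reverse ++ paritySumsB raw acc.length se so := by
  intro raw
  induction raw with
  | nil => intro acc se so _ _; simp [prefixRec, paritySumsB]
  | cons v rest ih =>
    intro acc se so h0 h1
    have step : ∀ (w : Int) (se' so' : Int),
        ((w :: acc).length % 2 = 0 →
          so' = (if 2 ≤ (w :: acc).length then (w :: acc).getD 0 0 else 0) ∧
          se' = (if 3 ≤ (w :: acc).length then (w :: acc).getD 1 0 else 0)) →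
        ((w :: acc).length % 2 = 1 →
          se' = (if 3 ≤ (w :: acc).length then (w :: acc).getD 0 0 else 0) ∧
          so' = (if 3 ≤ (w :: acc).length then (w :: acc).getD 1 0 else 0)) →
        prefixRec rest (acc.length + 1) (w :: acc)
          = acc.reverse ++ w :: paritySumsB rest (acc.length + 1) se' so' := by
      intro w se' so' h0' h1'
      have := ih (w :: acc) se' so' h0' h1'
      simpa [List.append_assoc] using this
    simp only [prefixRec, paritySumsB]
    by_cases hi0 : acc.length = 0
    · -- i = 0
      have hacc : acc = [] := List.length_eq_zero_iff.mp hi0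
      subst hacc
      obtain ⟨hso, hse⟩ := h0 (by simp)
      have hso0 : so = 0 := by simpa using hso
      have hse0 : se = 0 := by simpa using hse
      subst hso0 hse0
      simp only [List.length_nil, List.reverse_nil, List.nil_append]
      rw [if_neg (by omega : ¬ (3:Nat) ≤ 0), if_pos trivial]
      refine step v 0 0 ?_ ?_
      · intro hp; simp at hp
      · intro _
        refine ⟨?_, ?_⟩
        · rw [if_neg (by simp)]
        · rw [if_neg (by simp)]
    · by_cases hpar : acc.length % 2 = 1
      · -- i odd
        obtain ⟨hse, hso⟩ := h1 hpar
        rw [if_neg hi0, if_pos hpar]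
        by_cases h3 : 3 ≤ acc.length
        · have hso2 : so = acc.getD 1 0 := by rw [hso, if_pos h3]
          have hse2 : se = acc.getD 0 0 := by rw [hse, if_pos h3]
          rw [if_pos h3, hso2]
          have hc : acc.getD 1 0 + v = v + acc.getD 1 0 := add_comm _ _
          rw [hc]
          refine step (v + acc.getD 1 0) se (v + acc.getD 1 0) ?_ ?_
          · intro _
            refine ⟨?_, ?_⟩
            · rw [if_pos (show 2 ≤ ((v + acc.getD 1 0) :: acc).length by simp only [List.length_cons]; omega)]
              simp
            · rw [if_pos (show 3 ≤ ((v + acc.getD 1 0) :: acc).length by simp only [List.length_cons]; omega)]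
              simpa using hse2
          · intro hp; simp at hp; omega
        · -- i = 1
          have hso2 : so = 0 := by rw [hso, if_neg (by omega)]
          have hse2 : se = 0 := by rw [hse, if_neg (by omega)]
          rw [if_neg h3, hso2, zero_add]
          refine step v se v ?_ ?_
          · intro _
            refine ⟨?_, ?_⟩
            · rw [if_pos (show 2 ≤ (v :: acc).length by simp only [List.length_cons]; omega)]
              simp
            · rw [if_neg (show ¬ 3 ≤ (v :: acc).length by simp only [List.length_cons]; omega)]
              exact hse2
          · intro hp; simp at hp; omega
      · -- i even, i ≥ 2
        have hpar0 : acc.length % 2 = 0 := by omega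
        obtain ⟨hso, hse⟩ := h0 hpar0
        have hi2 : 2 ≤ acc.length := by omega
        have hso2 : so = acc.getD 0 0 := by rw [hso, if_pos hi2]
        rw [if_neg hi0, if_neg hpar]
        by_cases h3 : 3 ≤ acc.length
        · have hse2 : se = acc.getD 1 0 := by rw [hse, if_pos h3]
          rw [if_pos h3, hse2]
          have hc : acc.getD 1 0 + v = v + acc.getD 1 0 := add_comm _ _
          rw [hc]
          refine step (v + acc.getD 1 0) (v + acc.getD 1 0) so ?_ ?_
          · intro hp; simp at hp; omega
          · intro _
            refine ⟨?_, ?_⟩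
            · rw [if_pos (show 3 ≤ ((v + acc.getD 1 0) :: acc).length by simp only [List.length_cons]; omega)]
              simp
            · rw [if_pos (show 3 ≤ ((v + acc.getD 1 0) :: acc).length by simp only [List.length_cons]; omega)]
              simpa using hso2
        · -- i = 2
          have hse2 : se = 0 := by rw [hse, if_neg (by omega)]
          rw [if_neg h3, hse2, zero_add]
          refine step v v so ?_ ?_
          · intro hp; simp at hp; omega
          · intro _
            refine ⟨?_, ?_⟩
            · rw [if_pos (show 3 ≤ (v :: acc).length by simp only [List.length_cons]; omega)]
              simp
            · rw [if_pos (show 3 ≤ (v :: acc).length by simp only [List.length_cons]; omega)]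
              simpa using hso2
-- ===== VERDICT (by name: the statement is the Claim_ definition above) =====
theorem string2rle_spec : Claim_equal_string2rle := by
  intro s hdom _
  unfold Spec_string2rle string2rle string2rle_alt
  have hAll : AllDom s.toList := by
    intro c hc
    unfold Dom_string2rle pvDomStr at hdom
    rw [List.all_eq_true] at hdom
    exact hdom c hc
  rw [auxA_eq_prefixRec s.toList.length s.toList le_rfl []]
  rw [show ([] : List Int).length = 0 from rfl] at *
  rw [show (0 : Nat) = ([] : List Int).length from rfl]
  rw [parity_prefix (rawA s.toList) [] 0 0 (by intro _; simp) (by intro hp; simp at hp)]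
  rw [rawA_eq s.toList.length s.toList le_rfl hAll]
  rfl
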